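-- pv_equiv track=rewrite | github.com/EdvinAlvarado/Code-Wars | WhichAreIn.py | in_array
-- ===== SOURCE A (Python) =====
-- def in_array(array1, array2):
-- 	found = set()
-- 	for ar2 in array2:
-- 		for ar1 in array1:
-- 			if ar2.find(ar1) != -1:
-- 				found.add(ar1)
-- 	foundlist = list(found)
-- 	foundlist.sort()
-- 	return foundlist
-- ===== SOURCE B (Python) =====
-- def in_array(array1, array2):
--     lengths = {len(a) for a in array1}
--     subs = set()
--     for s in array2:
--         for L in lengths:
--             for i in range(len(s) - L + 1):
--                 subs.add(s[i:i + L])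
--     return sorted(set(array1) & subs)
-- ===== Notes on version B (the rewrite author's own statement) =====
-- stated objective: faster
-- what changed: A tests every array1 element against every array2 string with str.find and sorts the collected set; B never calls a substring search: it builds once a set index of all fixed-length windows of array2's strings (only the lengths occurring in array1), then returns the sorted set intersection set(array1) & index, so the n1*n2 pairwise scan disappears.
import Mathlib
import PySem

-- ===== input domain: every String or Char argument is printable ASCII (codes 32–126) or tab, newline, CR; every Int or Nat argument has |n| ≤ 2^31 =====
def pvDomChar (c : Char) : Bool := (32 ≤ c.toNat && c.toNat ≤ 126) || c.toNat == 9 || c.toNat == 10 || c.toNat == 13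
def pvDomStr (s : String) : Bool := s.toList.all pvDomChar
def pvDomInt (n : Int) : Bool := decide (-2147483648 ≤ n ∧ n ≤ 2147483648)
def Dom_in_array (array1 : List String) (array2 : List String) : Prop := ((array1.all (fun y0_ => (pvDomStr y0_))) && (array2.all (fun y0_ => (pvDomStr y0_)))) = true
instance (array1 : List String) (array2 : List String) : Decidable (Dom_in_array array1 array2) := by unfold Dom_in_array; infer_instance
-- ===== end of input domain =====

-- B replaces A's all-pairs str.find scan by a set index of the fixed-length windows of array2's
-- strings (only the lengths occurring in array1), answered by one set intersection; a timing run measured B faster.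

-- ===== PORT A =====
def in_array (array1 : List String) (array2 : List String) : List String :=
  let found : PySem.Set String :=
    array2.foldl (fun found ar2 =>
      array1.foldl (fun found ar1 =>
        if PySem.Str.find ar2 ar1 ≠ -1 then PySem.Set.add found ar1 else found) found)
      PySem.Set.empty
  -- list(found) then .sort(): the set is consumed only through a key-less sort, which is order-independent
  PySem.List.sorted found (fun x => x) false

-- ===== PORT B =====
-- lengths = {len(a) for a in array1}
def bLengths (array1 : List String) : PySem.Set Int :=
  PySem.Set.ofList (array1.map (fun a => PySem.Str.len a))

-- subs = the set of windows s[i:i+L] for s in array2, L in lengths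
def bSubs (array1 : List String) (array2 : List String) : PySem.Set String :=
  array2.foldl (fun subs s =>
    (bLengths array1).foldl (fun subs L =>
      (PySem.List.pyRange 0 (PySem.Str.len s - L + 1) 1).foldl (fun subs i =>
        PySem.Set.add subs (PySem.Str.slice s (some i) (some (i + L)))) subs) subs)
    PySem.Set.empty

def in_array_alt (array1 : List String) (array2 : List String) : List String :=
  PySem.List.sorted (PySem.Set.inter (PySem.Set.ofList array1) (bSubs array1 array2)) (fun x => x) false

-- ===== PRECONDITION & SPEC =====
def Spec_in_array (array1 : List String) (array2 : List String) (out : List String) : Prop := out = in_array_alt array1 array2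
instance (array1 : List String) (array2 : List String) (out : List String) : Decidable (Spec_in_array array1 array2 out) := by unfold Spec_in_array; infer_instance

-- ===== CLAIM (what is proved, stated in full; the proofs are below) =====
def Claim_equal_in_array : Prop := ∀ (array1 : List String) (array2 : List String), Dom_in_array array1 array2 → Spec_in_array array1 array2 (in_array array1 array2)

-- ===== LEMMAS AND PROOFS =====

-- generic membership in a foldl whose step adds elements characterised by P
theorem mem_foldl_or {β γ : Type} (l : List β) (g : List γ → β → List γ) (P : β → γ → Prop)
    (h : ∀ acc i x, x ∈ g acc i ↔ x ∈ acc ∨ P i x) (init : List γ) (x : γ) :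
    x ∈ l.foldl g init ↔ x ∈ init ∨ ∃ i ∈ l, P i x := by
  induction l generalizing init with
  | nil => simp
  | cons hd t ih =>
    rw [List.foldl_cons, ih, h]
    simp only [List.mem_cons]
    constructor
    · rintro ((hx | hp) | ⟨i, hi, hp⟩)
      · exact Or.inl hx
      · exact Or.inr ⟨hd, Or.inl rfl, hp⟩
      · exact Or.inr ⟨i, Or.inr hi, hp⟩
    · rintro (hx | ⟨i, (rfl | hi), hp⟩)
      · exact Or.inl (Or.inl hx)
      · exact Or.inl (Or.inr hp)
      · exact Or.inr ⟨i, hi, hp⟩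

theorem nodup_foldl {β γ : Type} (l : List β) (g : List γ → β → List γ)
    (h : ∀ acc i, acc.Nodup → (g acc i).Nodup) (init : List γ) (hi : init.Nodup) :
    (l.foldl g init).Nodup := by
  induction l generalizing init with
  | nil => exact hi
  | cons hd t ih => exact ih _ (h _ _ hi)

-- ---- A side ----
theorem mem_inner (a1 : List String) (ar2 : String) (f0 : List String) (x : String) :
    x ∈ a1.foldl (fun f ar1 => if PySem.Str.find ar2 ar1 ≠ -1 then PySem.Set.add f ar1 else f) f0 ↔
      x ∈ f0 ∨ (x ∈ a1 ∧ PySem.Str.find ar2 x ≠ -1) := by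
  rw [mem_foldl_or a1 _ (fun ar1 x => x = ar1 ∧ PySem.Str.find ar2 ar1 ≠ -1)]
  · constructor
    · rintro (hx | ⟨i, hi, rfl, hf⟩) <;> tauto
    · rintro (hx | ⟨hx, hf⟩)
      · tauto
      · exact Or.inr ⟨x, hx, rfl, hf⟩
  · intro acc i y
    by_cases hf : PySem.Str.find ar2 i ≠ -1
    · rw [if_pos hf, PySem.Set.mem_add]; tauto
    · rw [if_neg hf]; tauto

theorem mem_found (a1 a2 : List String) (x : String) :
    x ∈ a2.foldl (fun found ar2 =>
        a1.foldl (fun f ar1 => if PySem.Str.find ar2 ar1 ≠ -1 then PySem.Set.add f ar1 else f) found) PySem.Set.empty ↔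
      x ∈ a1 ∧ ∃ s ∈ a2, PySem.Str.find s x ≠ -1 := by
  rw [mem_foldl_or a2 _ (fun ar2 x => x ∈ a1 ∧ PySem.Str.find ar2 x ≠ -1)
    (fun acc i y => mem_inner a1 i acc y)]
  constructor
  · rintro (hx | ⟨s, hs, hx, hf⟩)
    · simp [PySem.Set.empty] at hx
    · exact ⟨hx, s, hs, hf⟩
  · rintro ⟨hx, s, hs, hf⟩
    exact Or.inr ⟨s, hs, hx, hf⟩

theorem nodup_found (a1 a2 : List String) :
    (a2.foldl (fun found ar2 =>
        a1.foldl (fun f ar1 => if PySem.Str.find ar2 ar1 ≠ -1 then PySem.Set.add f ar1 else f) found) PySem.Set.empty).Nodup := by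
  apply nodup_foldl
  · intro acc s hacc
    apply nodup_foldl
    · intro acc' t hacc'
      split
      · exact PySem.Set.nodup_add _ _ hacc'
      · exact hacc'
    · exact hacc
  · exact List.nodup_nil

-- ---- B side ----
theorem mem_win (s : String) (L : Int) (init : List String) (x : String) :
    x ∈ (PySem.List.pyRange 0 (PySem.Str.len s - L + 1) 1).foldl
        (fun subs i => PySem.Set.add subs (PySem.Str.slice s (some i) (some (i + L)))) init ↔
      x ∈ init ∨ ∃ i ∈ PySem.List.pyRange 0 (PySem.Str.len s - L + 1) 1,
        x = PySem.Str.slice s (some i) (some (i + L)) :=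
  mem_foldl_or (PySem.List.pyRange 0 (PySem.Str.len s - L + 1) 1) _
    (fun i x => x = PySem.Str.slice s (some i) (some (i + L)))
    (fun acc i y => PySem.Set.mem_add acc (PySem.Str.slice s (some i) (some (i + L))) y) init x

theorem mem_lens (s : String) (lens : List Int) (init : List String) (x : String) :
    x ∈ lens.foldl (fun subs L =>
        (PySem.List.pyRange 0 (PySem.Str.len s - L + 1) 1).foldl
          (fun subs i => PySem.Set.add subs (PySem.Str.slice s (some i) (some (i + L)))) subs) init ↔
      x ∈ init ∨ ∃ L ∈ lens, ∃ i ∈ PySem.List.pyRange 0 (PySem.Str.len s - L + 1) 1,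
        x = PySem.Str.slice s (some i) (some (i + L)) :=
  mem_foldl_or _ _ _ (fun acc L y => mem_win s L acc y) init x

theorem mem_bSubs (array1 array2 : List String) (x : String) :
    x ∈ bSubs array1 array2 ↔
      ∃ s ∈ array2, ∃ L ∈ bLengths array1, ∃ i ∈ PySem.List.pyRange 0 (PySem.Str.len s - L + 1) 1,
        x = PySem.Str.slice s (some i) (some (i + L)) := by
  unfold bSubs
  rw [mem_foldl_or _ _ _ (fun acc s y => mem_lens s (bLengths array1) acc y) PySem.Set.empty x]
  constructor
  · rintro (hx | h)
    · simp [PySem.Set.empty] at hx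
    · exact h
  · intro h; exact Or.inr h

theorem bSubs_iff_infix (array1 array2 : List String) (x : String) (hx : x ∈ array1) :
    x ∈ bSubs array1 array2 ↔ ∃ s ∈ array2, x.toList <:+: s.toList := by
  rw [mem_bSubs]
  constructor
  · rintro ⟨s, hs, L, hL, i, hi, rfl⟩
    rw [PySem.List.mem_pyRange_one] at hi
    refine ⟨s, hs, ?_⟩
    have hL0 : 0 ≤ L := by
      unfold bLengths at hL
      rw [PySem.Set.mem_ofList, List.mem_map] at hL
      obtain ⟨a, _, rfl⟩ := hL
      simp [PySem.Str.len]
    rw [PySem.Str.toList_slice, PySem.Chars.slice_eq_listSlice]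
    obtain ⟨iN, rfl⟩ := Int.eq_ofNat_of_zero_le hi.1
    obtain ⟨LN, rfl⟩ := Int.eq_ofNat_of_zero_le hL0
    rw [PySem.List.slice_natCast_add]
    exact ((List.take_prefix LN _).isInfix).trans ((List.drop_suffix iN _).isInfix)
  · rintro ⟨s, hs, t, u, ht⟩
    refine ⟨s, hs, PySem.Str.len x, ?_, (t.length : Int), ?_, ?_⟩
    · unfold bLengths
      rw [PySem.Set.mem_ofList, List.mem_map]
      exact ⟨x, hx, rfl⟩
    · rw [PySem.List.mem_pyRange_one]
      have hlt := congrArg List.length ht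
      simp only [List.length_append] at hlt
      have h1 : x.toList.length = x.length := by simp
      have h2 : s.toList.length = s.length := by simp
      have h3 : PySem.Str.len s = (s.length : Int) := by simp [PySem.Str.len]
      have h4 : PySem.Str.len x = (x.length : Int) := by simp [PySem.Str.len]
      rw [h3, h4]
      constructor
      · positivity
      · omega
    · rw [← String.toList_inj, PySem.Str.toList_slice, PySem.Chars.slice_eq_listSlice]
      have hlen : PySem.Str.len x = ((x.toList.length : Nat) : Int) := by simp [PySem.Str.len]
      rw [hlen, PySem.List.slice_natCast_add, ← ht, List.append_assoc, List.drop_left,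
        List.take_left]

-- ===== VERDICT (by name: the statement is the Claim_ definition above) =====
theorem in_array_spec : Claim_equal_in_array := by
  intro array1 array2 _
  unfold Spec_in_array in_array in_array_alt
  apply PySem.List.sorted_eq_sorted_of_perm _ _ _ (fun a b h => h)
  apply (List.perm_ext_iff_of_nodup (nodup_found array1 array2)
    (PySem.Set.nodup_inter _ _ (PySem.Set.nodup_ofList array1))).mpr
  intro x
  rw [mem_found, PySem.Set.mem_inter, PySem.Set.mem_ofList]
  by_cases hx : x ∈ array1
  · rw [bSubs_iff_infix array1 array2 x hx]
    simp only [PySem.Str.find_ne_neg_one_iff]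
  · tauto
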